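-- pv_equiv track=rewrite | github.com/aecs4u/NASTRAN-95 | scripts/generate_nastran_call_flowchart.py | reachable_graph
-- ===== SOURCE A (Python) =====
-- from collections import deque
--
-- def reachable_graph(
--     calls: dict[str, set[str]],
--     root: str,
--     max_depth: int,
--     include_external: bool,
-- ) -> tuple[set[str], set[tuple[str, str]], dict[str, int]]:
--     declared = set(calls.keys())
--     root = root.upper()
--     seen: set[str] = {root}
--     depth: dict[str, int] = {root: 0}
--     edges: set[tuple[str, str]] = set()
--     q: deque[str] = deque([root])
--
--     while q:
--         caller = q.popleft()
--         d = depth[caller]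
--         if d >= max_depth:
--             continue
--
--         for callee in sorted(calls.get(caller, ())):
--             internal = callee in declared
--             if internal or include_external:
--                 edges.add((caller, callee))
--                 if callee not in seen:
--                     seen.add(callee)
--                     depth[callee] = d + 1
--                     # Continue traversal only through internal routines.
--                     if internal:
--                         q.append(callee)
--
--     return seen, edges, depth
-- ===== SOURCE B (Python) =====
-- def reachable_graph(calls, root, max_depth, include_external):
--     # Level-synchronous BFS: no deque and no per-node depth lookup; the
--     # current level number IS the depth of every frontier node.
--     declared = set(calls)
--     root = root.upper()
--     seen = {root}
--     depth = {root: 0}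
--     edges = set()
--     frontier = [root]
--     level = 0
--     while frontier and level < max_depth:
--         next_frontier = []
--         for caller in frontier:
--             for callee in sorted(calls.get(caller, ())):
--                 internal = callee in declared
--                 if internal or include_external:
--                     edges.add((caller, callee))
--                     if callee not in seen:
--                         seen.add(callee)
--                         depth[callee] = level + 1
--                         if internal:
--                             next_frontier.append(callee)
--         frontier = next_frontier
--         level += 1
--     return seen, edges, depth
-- ===== Notes on version B (the rewrite author's own statement) =====
-- stated objective: alternative
-- what changed: Replaces the deque-driven BFS (one queue, per-node depth dictionary lookups to decide cutoff) by a level-synchronous BFS that processes one whole frontier list per level, the level counter itself giving every discovered node's depth.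
import Mathlib
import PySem

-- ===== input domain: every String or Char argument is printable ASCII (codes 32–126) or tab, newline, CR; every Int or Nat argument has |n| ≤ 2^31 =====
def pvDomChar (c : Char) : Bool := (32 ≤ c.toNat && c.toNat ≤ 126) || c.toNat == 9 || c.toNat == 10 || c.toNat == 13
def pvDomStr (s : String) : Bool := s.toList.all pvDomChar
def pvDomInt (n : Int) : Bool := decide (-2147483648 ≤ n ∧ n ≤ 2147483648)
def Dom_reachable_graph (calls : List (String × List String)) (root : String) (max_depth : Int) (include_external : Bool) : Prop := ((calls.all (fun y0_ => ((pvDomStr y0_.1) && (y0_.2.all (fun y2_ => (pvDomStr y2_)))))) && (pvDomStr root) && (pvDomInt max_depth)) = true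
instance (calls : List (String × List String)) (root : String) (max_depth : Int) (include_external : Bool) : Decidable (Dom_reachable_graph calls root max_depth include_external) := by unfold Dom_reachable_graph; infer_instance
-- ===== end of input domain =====

-- B re-implements the deque BFS as a level-synchronous BFS (frontier list per level,
-- the level counter replaces the per-node depth lookup); same return value, objective: alternative.

-- ===== PORT A =====
-- Shared inner-loop body: BOTH Pythons contain the identical
-- 'for callee in sorted(calls.get(caller, ())): ...' block; the 4th state
-- component is A's queue (appended in place) resp. B's next_frontier.
def pvStep (decl : PySem.Set String) (ie : Bool) (caller : String) (d : Int)
    (st : PySem.Set String × PySem.Dict String Int × PySem.Set (String × String) × List String)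
    (callee : String) :
    PySem.Set String × PySem.Dict String Int × PySem.Set (String × String) × List String :=
  let internal := PySem.Set.contains decl callee
  if internal || ie then
    let e := PySem.Set.add st.2.2.1 (caller, callee)
    if PySem.Set.contains st.1 callee then (st.1, st.2.1, e, st.2.2.2)
    else (PySem.Set.add st.1 callee, (st.2.1).insert callee (d + 1), e,
          if internal then st.2.2.2 ++ [callee] else st.2.2.2)
  else st

def pvVisit (decl : PySem.Set String) (cd : PySem.Dict String (List String)) (ie : Bool) (d : Int)
    (st : PySem.Set String × PySem.Dict String Int × PySem.Set (String × String) × List String)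
    (caller : String) :
    PySem.Set String × PySem.Dict String Int × PySem.Set (String × String) × List String :=
  (PySem.List.sorted (PySem.Dict.getD cd caller []) (fun x => x) false).foldl
    (pvStep decl ie caller d) st

-- A's 'while q:' loop; fuel is a Lean artifact (an upper bound on the number of
-- pops, proved sufficient below), never reached by the Python.
-- 'depth[caller]' is total here (getD _ 0): the loop invariant keeps every queued
-- node a key of depth, so the default is never consulted.
def pvLoopA (decl : PySem.Set String) (cd : PySem.Dict String (List String)) (ie : Bool) (md : Int) :
    Nat → PySem.Set String → PySem.Dict String Int → PySem.Set (String × String) → List String →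
    PySem.Set String × PySem.Dict String Int × PySem.Set (String × String)
  | 0, s, dp, e, _ => (s, dp, e)
  | _ + 1, s, dp, e, [] => (s, dp, e)
  | fuel + 1, s, dp, e, caller :: q =>
    let d := PySem.Dict.getD dp caller 0
    if md ≤ d then pvLoopA decl cd ie md fuel s dp e q
    else
      let r := pvVisit decl cd ie d (s, dp, e, q) caller
      pvLoopA decl cd ie md fuel r.1 r.2.1 r.2.2.1 r.2.2.2

def reachable_graph (calls : List (String × List String)) (root : String) (max_depth : Int) (include_external : Bool) : List String × (List (String × String)) × (List (String × Int)) :=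
  let cd := PySem.Dict.ofList calls
  let decl := PySem.Set.ofList cd.keys
  let r := PySem.Str.upper root
  let out := pvLoopA decl cd include_external max_depth
      ((PySem.List.dedup (calls.flatMap (fun p => p.2))).length + 2)
      (PySem.Set.ofList [r]) (PySem.Dict.ofList [(r, (0 : Int))]) PySem.Set.empty [r]
  (out.1, out.2.2, out.2.1.items)

-- ===== PORT B =====
-- B's 'while frontier and level < max_depth:' loop (level-synchronous BFS).
def pvLoopB (decl : PySem.Set String) (cd : PySem.Dict String (List String)) (ie : Bool) (md : Int)
    (lvl : Int) (frontier : List String)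
    (s : PySem.Set String) (dp : PySem.Dict String Int) (e : PySem.Set (String × String)) :
    PySem.Set String × PySem.Dict String Int × PySem.Set (String × String) :=
  if frontier = [] ∨ md ≤ lvl then (s, dp, e)
  else
    let r := frontier.foldl (pvVisit decl cd ie lvl) (s, dp, e, ([] : List String))
    pvLoopB decl cd ie md (lvl + 1) r.2.2.2 r.1 r.2.1 r.2.2.1
  termination_by (md - lvl).toNat
  decreasing_by simp only [not_or] at *; omega

def reachable_graph_alt (calls : List (String × List String)) (root : String) (max_depth : Int) (include_external : Bool) : List String × (List (String × String)) × (List (String × Int)) :=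
  let cd := PySem.Dict.ofList calls
  let decl := PySem.Set.ofList cd.keys
  let r := PySem.Str.upper root
  let out := pvLoopB decl cd include_external max_depth 0 [r]
      (PySem.Set.ofList [r]) (PySem.Dict.ofList [(r, (0 : Int))]) PySem.Set.empty
  (out.1, out.2.2, out.2.1.items)

-- ===== PRECONDITION & SPEC =====
def Spec_reachable_graph (calls : List (String × List String)) (root : String) (max_depth : Int) (include_external : Bool) (out : List String × (List (String × String)) × (List (String × Int))) : Prop := out = reachable_graph_alt calls root max_depth include_external
instance (calls : List (String × List String)) (root : String) (max_depth : Int) (include_external : Bool) (out : List String × (List (String × String)) × (List (String × Int))) : Decidable (Spec_reachable_graph calls root max_depth include_external out) := by unfold Spec_reachable_graph; infer_instance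

-- ===== CLAIM (what is proved, stated in full; the proofs are below) =====
def Claim_equal_reachable_graph : Prop := ∀ (calls : List (String × List String)) (root : String) (max_depth : Int) (include_external : Bool), Dom_reachable_graph calls root max_depth include_external → Spec_reachable_graph calls root max_depth include_external (reachable_graph calls root max_depth include_external)

-- ===== LEMMAS AND PROOFS =====

-- the number of potential new BFS discoveries left; decreases with every enqueue
def pvPhi (U s : List String) : Nat :=
  ((PySem.List.dedup U).filter (fun x => decide (x ∉ s))).length

theorem pvStep_shift (decl : PySem.Set String) (ie : Bool) (caller c : String) (d : Int)
    (s : PySem.Set String) (dp : PySem.Dict String Int) (e : PySem.Set (String × String))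
    (q : List String) :
    pvStep decl ie caller d (s, dp, e, q) c =
      ((pvStep decl ie caller d (s, dp, e, []) c).1,
       (pvStep decl ie caller d (s, dp, e, []) c).2.1,
       (pvStep decl ie caller d (s, dp, e, []) c).2.2.1,
       q ++ (pvStep decl ie caller d (s, dp, e, []) c).2.2.2) := by
  simp only [pvStep]
  split_ifs <;> simp

theorem pvFold_shift (decl : PySem.Set String) (ie : Bool) (caller : String) (d : Int)
    (cs : List String) :
    ∀ (s : PySem.Set String) (dp : PySem.Dict String Int) (e : PySem.Set (String × String))
      (q : List String),
    cs.foldl (pvStep decl ie caller d) (s, dp, e, q) =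
      ((cs.foldl (pvStep decl ie caller d) (s, dp, e, [])).1,
       (cs.foldl (pvStep decl ie caller d) (s, dp, e, [])).2.1,
       (cs.foldl (pvStep decl ie caller d) (s, dp, e, [])).2.2.1,
       q ++ (cs.foldl (pvStep decl ie caller d) (s, dp, e, [])).2.2.2) := by
  induction cs with
  | nil => intro s dp e q; simp
  | cons c cs ih =>
    intro s dp e q
    simp only [List.foldl_cons]
    rw [pvStep_shift decl ie caller c d s dp e q]
    obtain ⟨u1, u2, u3, u4⟩ : _ × _ × _ × _ := pvStep decl ie caller d (s, dp, e, []) c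
    rw [ih u1 u2 u3 (q ++ u4), ih u1 u2 u3 u4]
    simp

theorem pvFold_spec (decl : PySem.Set String) (ie : Bool) (caller : String) (d : Int)
    (cs : List String) :
    ∀ (s : PySem.Set String) (dp : PySem.Dict String Int) (e : PySem.Set (String × String))
      (q : List String),
    ∃ m n,
      (cs.foldl (pvStep decl ie caller d) (s, dp, e, q)).1 = s ++ m ∧
      (cs.foldl (pvStep decl ie caller d) (s, dp, e, q)).2.2.2 = q ++ n ∧
      n.Sublist m ∧ m.Nodup ∧
      (∀ x ∈ m, x ∈ cs ∧ x ∉ s) ∧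
      (∀ x ∈ s, PySem.Dict.getD (cs.foldl (pvStep decl ie caller d) (s, dp, e, q)).2.1 x 0
          = PySem.Dict.getD dp x 0) ∧
      (∀ x ∈ m, PySem.Dict.getD (cs.foldl (pvStep decl ie caller d) (s, dp, e, q)).2.1 x 0
          = d + 1) := by
  induction cs with
  | nil =>
    intro s dp e q
    exact ⟨[], [], by simp, by simp, List.Sublist.refl _, List.nodup_nil, by simp, by simp, by simp⟩
  | cons c cs ih =>
    intro s dp e q
    simp only [List.foldl_cons]
    by_cases h1 : (PySem.Set.contains decl c || ie) = true
    · by_cases h2 : PySem.Set.contains s c = true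
      · have hstep : pvStep decl ie caller d (s, dp, e, q) c
            = (s, dp, PySem.Set.add e (caller, c), q) := by
          simp only [pvStep]; rw [if_pos h1, if_pos h2]
        rw [hstep]
        obtain ⟨m, n, a1, a2, a3, a4, a5, a6, a7⟩ := ih s dp (PySem.Set.add e (caller, c)) q
        exact ⟨m, n, a1, a2, a3, a4, fun x hx => ⟨List.mem_cons_of_mem _ (a5 x hx).1, (a5 x hx).2⟩, a6, a7⟩
      · have hc : c ∉ s := by simpa [PySem.Set.contains] using h2
        have hstep : pvStep decl ie caller d (s, dp, e, q) c
            = (s ++ [c], dp.insert c (d + 1), PySem.Set.add e (caller, c),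
               if PySem.Set.contains decl c then q ++ [c] else q) := by
          simp only [pvStep]; rw [if_pos h1, if_neg h2]
          simp [PySem.Set.add, hc]
        rw [hstep]
        obtain ⟨m', n', hr1, hr4, hsub, hnd, hmem, hpres, hdep⟩ :=
          ih (s ++ [c]) (dp.insert c (d + 1)) (PySem.Set.add e (caller, c))
            (if PySem.Set.contains decl c then q ++ [c] else q)
        have hcm' : c ∉ m' := fun hx => (hmem c hx).2 (by simp)
        refine ⟨c :: m', (if PySem.Set.contains decl c then [c] else []) ++ n', ?_, ?_, ?_, ?_, ?_, ?_, ?_⟩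
        · rw [hr1]; simp
        · rw [hr4]; split <;> simp
        · split
          · exact List.Sublist.cons₂ c hsub
          · exact List.Sublist.cons c hsub
        · exact List.nodup_cons.2 ⟨hcm', hnd⟩
        · intro x hx
          rcases List.mem_cons.1 hx with rfl | hx
          · exact ⟨List.mem_cons_self, hc⟩
          · refine ⟨List.mem_cons_of_mem _ (hmem x hx).1, fun hxs => (hmem x hx).2 (by simp [hxs])⟩
        · intro x hx
          rw [hpres x (by simp [hx]), PySem.Dict.getD_insert]
          rw [if_neg]; rintro rfl; exact hc hx
        · intro x hx
          rcases List.mem_cons.1 hx with rfl | hx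
          · rw [hpres x (by simp), PySem.Dict.getD_insert, if_pos rfl]
          · exact hdep x hx
    · have hstep : pvStep decl ie caller d (s, dp, e, q) c = (s, dp, e, q) := by
        simp only [pvStep]; rw [if_neg h1]
      rw [hstep]
      obtain ⟨m, n, a1, a2, a3, a4, a5, a6, a7⟩ := ih s dp e q
      exact ⟨m, n, a1, a2, a3, a4, fun x hx => ⟨List.mem_cons_of_mem _ (a5 x hx).1, (a5 x hx).2⟩, a6, a7⟩

theorem pvDrain (decl : PySem.Set String) (cd : PySem.Dict String (List String)) (ie : Bool)
    (md : Int) (q : List String) :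
    ∀ (fuel : Nat) (s : PySem.Set String) (dp : PySem.Dict String Int)
      (e : PySem.Set (String × String)),
    q.length ≤ fuel → (∀ x ∈ q, md ≤ PySem.Dict.getD dp x 0) →
    pvLoopA decl cd ie md fuel s dp e q = (s, dp, e) := by
  induction q with
  | nil => intro fuel s dp e _ _; cases fuel <;> rfl
  | cons c q ih =>
    intro fuel s dp e hlen hdep
    cases fuel with
    | zero => simp at hlen
    | succ fuel =>
      simp only [pvLoopA]
      rw [if_pos (hdep c List.mem_cons_self)]
      exact ih fuel s dp e (by simpa using hlen) (fun x hx => hdep x (List.mem_cons_of_mem _ hx))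

theorem pvUpdate_getD_mem (l : List (String × List String)) :
    ∀ (d0 : PySem.Dict String (List String)) (k x : String),
    x ∈ PySem.Dict.getD (PySem.Dict.update d0 l) k [] →
    x ∈ l.flatMap (fun p => p.2) ∨ x ∈ PySem.Dict.getD d0 k [] := by
  induction l with
  | nil => intro d0 k x h; exact Or.inr h
  | cons p l ih =>
    intro d0 k x h
    simp only [PySem.Dict.update, List.foldl_cons] at h
    rcases ih (d0.insert p.1 p.2) k x h with h1 | h2
    · exact Or.inl (by simp only [List.flatMap_cons, List.mem_append]; exact Or.inr h1)
    · rw [PySem.Dict.getD_insert] at h2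
      by_cases hk : k = p.1
      · rw [if_pos hk] at h2
        exact Or.inl (by simp only [List.flatMap_cons, List.mem_append]; exact Or.inl h2)
      · rw [if_neg hk] at h2; exact Or.inr h2

theorem pvPhi_drop (U s m n : List String) (hm : m.Nodup) (hn : n.Sublist m)
    (hmem : ∀ x ∈ m, x ∈ U ∧ x ∉ s) :
    pvPhi U (s ++ m) + n.length ≤ pvPhi U s := by
  unfold pvPhi
  have hsplit : ((PySem.List.dedup U).filter (fun x => decide (x ∉ s))).length
      = ((PySem.List.dedup U).filter (fun x => decide (x ∉ s) && decide (x ∈ m))).length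
        + ((PySem.List.dedup U).filter (fun x => decide (x ∉ s) && !decide (x ∈ m))).length := by
    rw [List.length_eq_length_filter_add (l := (PySem.List.dedup U).filter (fun x => decide (x ∉ s))) (fun x => decide (x ∈ m))]
    rw [List.filter_filter, List.filter_filter]
    congr 1
    · congr 1; apply List.filter_congr; intro x _; rw [Bool.and_comm]
    · congr 1; apply List.filter_congr; intro x _; rw [Bool.and_comm]
  rw [hsplit]
  have h1 : ((PySem.List.dedup U).filter (fun x => decide (x ∉ s ++ m))).length
      = ((PySem.List.dedup U).filter (fun x => decide (x ∉ s) && !decide (x ∈ m))).length := by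
    congr 1; apply List.filter_congr; intro x _
    simp [List.mem_append, not_or]
  have h2 : n.length ≤ ((PySem.List.dedup U).filter (fun x => decide (x ∉ s) && decide (x ∈ m))).length := by
    have hnd : n.Nodup := hm.sublist hn
    have hsubset : n ⊆ (PySem.List.dedup U).filter (fun x => decide (x ∉ s) && decide (x ∈ m)) := by
      intro x hx
      have hxm : x ∈ m := hn.subset hx
      simp only [List.mem_filter, PySem.List.mem_dedup]
      exact ⟨(hmem x hxm).1, by simp [(hmem x hxm).2, hxm]⟩
    calc n.length = n.toFinset.card := (List.toFinset_card_of_nodup hnd).symm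
      _ ≤ ((PySem.List.dedup U).filter (fun x => decide (x ∉ s) && decide (x ∈ m))).toFinset.card :=
          Finset.card_le_card (fun x hx => List.mem_toFinset.2 (hsubset (List.mem_toFinset.1 hx)))
      _ ≤ _ := List.toFinset_card_le _
  omega

theorem pv_sim (decl : PySem.Set String) (cd : PySem.Dict String (List String)) (ie : Bool)
    (md : Int) (U : List String)
    (hU : ∀ k x, x ∈ PySem.Dict.getD cd k [] → x ∈ U) :
    ∀ (L fuel : Nat) (d : Int) (f1 f2 : List String) (s : PySem.Set String)
      (dp : PySem.Dict String Int) (e : PySem.Set (String × String)),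
    (md - d).toNat ≤ L → d < md →
    (∀ x ∈ f1, PySem.Dict.getD dp x 0 = d) →
    (∀ x ∈ f2, PySem.Dict.getD dp x 0 = d + 1) →
    (∀ x ∈ f1, x ∈ s) → (∀ x ∈ f2, x ∈ s) →
    f1.length + f2.length + pvPhi U s ≤ fuel →
    pvLoopA decl cd ie md fuel s dp e (f1 ++ f2) =
      pvLoopB decl cd ie md (d + 1)
        (f1.foldl (pvVisit decl cd ie d) (s, dp, e, f2)).2.2.2
        (f1.foldl (pvVisit decl cd ie d) (s, dp, e, f2)).1
        (f1.foldl (pvVisit decl cd ie d) (s, dp, e, f2)).2.1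
        (f1.foldl (pvVisit decl cd ie d) (s, dp, e, f2)).2.2.1 := by
  intro L
  induction L with
  | zero =>
    intro fuel d f1 f2 s dp e hL hd
    exfalso; omega
  | succ L ihL =>
    intro fuel
    induction fuel with
    | zero =>
      intro d f1 f2 s dp e hL hd h1 h2 hs1 hs2 hfuel
      have hf1 : f1 = [] := List.length_eq_zero_iff.1 (by omega)
      have hf2 : f2 = [] := List.length_eq_zero_iff.1 (by omega)
      subst hf1; subst hf2
      rw [pvLoopB]
      simp [pvLoopA]
    | succ fuel ihF =>
      intro d f1 f2 s dp e hL hd h1 h2 hs1 hs2 hfuel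
      cases f1 with
      | nil =>
        simp only [List.foldl_nil, List.nil_append]
        cases f2 with
        | nil =>
          rw [pvLoopB]
          simp [pvLoopA]
        | cons y ys =>
          by_cases hd2 : d + 1 < md
          · have h := ihL (fuel + 1) (d + 1) (y :: ys) [] s dp e (by omega) hd2 h2
              (by simp) hs2 (by simp) (by simp at hfuel ⊢; omega)
            rw [List.append_nil] at h
            rw [h]
            conv_rhs => rw [pvLoopB]
            rw [if_neg (by simp only [not_or]; exact ⟨by simp, by omega⟩)]
          · rw [pvDrain decl cd ie md (y :: ys) (fuel + 1) s dp e
              (by simp at hfuel ⊢; omega)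
              (fun x hx => by rw [h2 x hx]; omega)]
            conv_rhs => rw [pvLoopB]
            rw [if_pos (Or.inr (by omega))]
      | cons c f1' =>
        simp only [List.cons_append, pvLoopA, List.foldl_cons]
        rw [h1 c List.mem_cons_self]
        rw [if_neg (by omega : ¬ md ≤ d)]
        set T := List.foldl (pvStep decl ie c d) (s, dp, e, ([] : List String))
          (PySem.List.sorted (PySem.Dict.getD cd c []) (fun x => x) false) with hT
        obtain ⟨m, n, a1, a2, a3, a4, a5, a6, a7⟩ := pvFold_spec decl ie c d
          (PySem.List.sorted (PySem.Dict.getD cd c []) (fun x => x) false) s dp e []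
        rw [← hT] at a1 a2 a6 a7
        rw [List.nil_append] at a2
        have hv2 : pvVisit decl cd ie d (s, dp, e, f1' ++ f2) c
            = (s ++ m, T.2.1, T.2.2.1, f1' ++ (f2 ++ n)) := by
          simp only [pvVisit]
          rw [pvFold_shift decl ie c d _ s dp e (f1' ++ f2), ← hT, a1, a2, List.append_assoc]
        have hvB : pvVisit decl cd ie d (s, dp, e, f2) c
            = (s ++ m, T.2.1, T.2.2.1, f2 ++ n) := by
          simp only [pvVisit]
          rw [pvFold_shift decl ie c d _ s dp e f2, ← hT, a1, a2]
        rw [hv2, hvB]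
        have hmU : ∀ x ∈ m, x ∈ U ∧ x ∉ s := by
          intro x hx
          refine ⟨hU c x ?_, (a5 x hx).2⟩
          have h := (a5 x hx).1
          rwa [PySem.List.mem_sorted] at h
        have hphi := pvPhi_drop U s m n a4 a3 hmU
        exact ihF d f1' (f2 ++ n) (s ++ m) T.2.1 T.2.2.1 hL hd
          (fun x hx => by
            rw [a6 x (hs1 x (List.mem_cons_of_mem _ hx))]
            exact h1 x (List.mem_cons_of_mem _ hx))
          (fun x hx => by
            rcases List.mem_append.1 hx with hx' | hx'
            · rw [a6 x (hs2 x hx')]; exact h2 x hx'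
            · exact a7 x (a3.subset hx'))
          (fun x hx => List.mem_append.2 (Or.inl (hs1 x (List.mem_cons_of_mem _ hx))))
          (fun x hx => by
            rcases List.mem_append.1 hx with hx' | hx'
            · exact List.mem_append.2 (Or.inl (hs2 x hx'))
            · exact List.mem_append.2 (Or.inr (a3.subset hx')))
          (by simp at hfuel ⊢; omega)

-- ===== VERDICT (by name: the statement is the Claim_ definition above) =====
theorem reachable_graph_spec : Claim_equal_reachable_graph := by
  intro calls root md ie _
  simp only [Spec_reachable_graph, reachable_graph, reachable_graph_alt]
  have hdp : PySem.Dict.getD (PySem.Dict.ofList [(PySem.Str.upper root, (0 : Int))])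
      (PySem.Str.upper root) 0 = 0 := by
    simp [PySem.Dict.ofList, PySem.Dict.update]
  have hU : ∀ k x, x ∈ PySem.Dict.getD (PySem.Dict.ofList calls) k [] →
      x ∈ calls.flatMap (fun p => p.2) := by
    intro k x hx
    rcases pvUpdate_getD_mem calls PySem.Dict.empty k x hx with h | h
    · exact h
    · simp [PySem.Dict.getD, PySem.Dict.get?, PySem.Dict.empty] at h
  have main : pvLoopA (PySem.Set.ofList (PySem.Dict.ofList calls).keys) (PySem.Dict.ofList calls)
      ie md ((PySem.List.dedup (calls.flatMap (fun p => p.2))).length + 2)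
      (PySem.Set.ofList [PySem.Str.upper root])
      (PySem.Dict.ofList [(PySem.Str.upper root, (0 : Int))]) PySem.Set.empty
      [PySem.Str.upper root]
      = pvLoopB (PySem.Set.ofList (PySem.Dict.ofList calls).keys) (PySem.Dict.ofList calls)
      ie md 0 [PySem.Str.upper root]
      (PySem.Set.ofList [PySem.Str.upper root])
      (PySem.Dict.ofList [(PySem.Str.upper root, (0 : Int))]) PySem.Set.empty := by
    by_cases hmd : 0 < md
    · have h := pv_sim (PySem.Set.ofList (PySem.Dict.ofList calls).keys) (PySem.Dict.ofList calls)
        ie md (calls.flatMap (fun p => p.2)) hU md.toNat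
        ((PySem.List.dedup (calls.flatMap (fun p => p.2))).length + 2) 0
        [PySem.Str.upper root] []
        (PySem.Set.ofList [PySem.Str.upper root])
        (PySem.Dict.ofList [(PySem.Str.upper root, (0 : Int))]) PySem.Set.empty
        (by omega) hmd
        (by intro x hx; rcases List.mem_singleton.1 hx with rfl; exact hdp)
        (by simp) (by intro x hx; rcases List.mem_singleton.1 hx with rfl; exact (PySem.Set.mem_ofList _ _).2 (List.mem_singleton.2 rfl))
        (by simp)
        (by
          have := List.length_filter_le
            (fun x => decide (x ∉ PySem.Set.ofList [PySem.Str.upper root]))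
            (PySem.List.dedup (calls.flatMap (fun p => p.2)))
          simp only [pvPhi, List.length_singleton, List.length_nil]; omega)
      rw [List.append_nil] at h
      rw [h]
      conv_rhs => rw [pvLoopB]
      rw [if_neg (by simp only [not_or]; exact ⟨by simp, by omega⟩)]
    · rw [pvDrain _ _ ie md [PySem.Str.upper root] _ _ _ _ (by simp)
        (by intro x hx; rcases List.mem_singleton.1 hx with rfl; rw [hdp]; omega)]
      conv_rhs => rw [pvLoopB]
      rw [if_pos (Or.inr (by omega))]
  rw [main]
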